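-- pv_equiv track=rewrite | github.com/YousefGh/Bioinformatics-I | clumpFinder.py | chunkedClumpFinder
-- ===== SOURCE A (Python) =====
-- def chunkedClumpFinder(sequence, k, L, t):
--     """"
--     uses a set for duplicates, the dict is for frequencies only instead of an array of dicts
--     separates each window length into an algorithm chunk (sliding window)
--     3x faster than clumpFinder() but still slow (many redundant operations!)
--
--     :param sequence: Genome
--     :param k: length of the pattern (k-mer)
--     :param L: Length of the window at which the pattern appears
--     :param t: number of times the pattern appears at a window
--     :return: set of clumps
--     """
--
--     frequentPatterns = set([])
--     for i in range(len(sequence)):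
--         window = sequence[i:i + L]
--         frequencies = {}
--
--         for j in range(len(window)):
--             pattern = window[j:j + k]
--             if pattern not in frequencies:
--                 frequencies[pattern] = 1
--             else:
--                 frequencies[pattern] += 1
--         for p in frequencies:
--             if frequencies[p] >= t:
--                 frequentPatterns.add(p)
--     return frequentPatterns
-- ===== SOURCE B (Python) =====
-- def chunkedClumpFinder(sequence, k, L, t):
--     """Sort-and-scan instead of hash counting: per window, sort the pattern
--     slices so equal patterns form contiguous runs, collect the patterns whose
--     run is >= t long, then one membership pass over the window emits them."""
--     result = set()
--     for i in range(len(sequence)):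
--         window = sequence[i:i + L]
--         pats = [window[j:j + k] for j in range(len(window))]
--         qualifying = _run_lengths_at_least(sorted(pats), t)
--         result.update(p for p in pats if p in qualifying)
--     return result
--
--
-- def _run_lengths_at_least(srt, t):
--     """srt is sorted, so equal items are contiguous; return the set of items
--     whose run length is >= t."""
--     q = set()
--     m = 0
--     while m < len(srt):
--         r = m + 1
--         while r < len(srt) and srt[r] == srt[m]:
--             r += 1
--         if r - m >= t:
--             q.add(srt[m])
--         m = r
--     return q
-- ===== Notes on version B (the rewrite author's own statement) =====
-- stated objective: alternative
-- what changed: Per window, B sorts the pattern slices so equal patterns form contiguous runs, collects patterns whose run is >= t long by a linear run scan, and emits them by a membership pass over the window, instead of A's frequency dict built in an inner counting loop and then scanned.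
import Mathlib
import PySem

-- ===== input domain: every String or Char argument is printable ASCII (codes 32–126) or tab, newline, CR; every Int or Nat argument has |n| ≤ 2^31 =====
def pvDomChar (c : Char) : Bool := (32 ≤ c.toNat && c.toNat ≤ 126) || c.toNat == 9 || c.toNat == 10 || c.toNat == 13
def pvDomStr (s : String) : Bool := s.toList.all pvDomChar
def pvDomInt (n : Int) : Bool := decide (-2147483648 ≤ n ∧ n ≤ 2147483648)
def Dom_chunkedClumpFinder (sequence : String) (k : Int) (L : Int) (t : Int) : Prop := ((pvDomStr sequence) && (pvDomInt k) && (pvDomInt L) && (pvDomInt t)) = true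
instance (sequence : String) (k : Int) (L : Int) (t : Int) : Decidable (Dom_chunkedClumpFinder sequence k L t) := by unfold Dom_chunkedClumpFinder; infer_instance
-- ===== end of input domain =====

-- B replaces A's per-window frequency dict by sort-and-scan: the window's pattern slices are
-- sorted so equal patterns form contiguous runs, runs of length ≥ t give the qualifying set,
-- and one membership pass over the window emits them; alternative, same exact result.

-- ===== PORT A =====
-- strings handled as char lists (exact); the returned Python set is the patterns in first-insertion order
def chunkedClumpFinder (sequence : String) (k : Int) (L : Int) (t : Int) : List String :=
  let s := sequence.toList
  let frequentPatterns : PySem.Set (List Char) :=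
    (PySem.List.pyRange 0 (PySem.Str.len sequence) 1).foldl (fun frequentPatterns i =>
      let window := PySem.List.slice s (some i) (some (i + L))
      let frequencies : PySem.Dict (List Char) Int :=
        (PySem.List.pyRange 0 (window.length : Int) 1).foldl (fun frequencies j =>
          let pattern := PySem.List.slice window (some j) (some (j + k))
          if frequencies.contains pattern = false then
            frequencies.insert pattern 1
          else
            -- key is present here, so frequencies[pattern] += 1 is modify with any default
            frequencies.modify pattern 0 (· + 1)) PySem.Dict.empty
      frequencies.keys.foldl (fun fp p =>
        if t ≤ frequencies.getD p 0 then PySem.Set.add fp p else fp) frequentPatterns)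
      PySem.Set.empty
  frequentPatterns.map String.ofList

-- ===== PORT B =====
-- Source B's _run_lengths_at_least: the outer while loop is this structural recursion, the inner
-- 'advance r while equal' loop is takeWhile/dropWhile of the elements equal to the run head
def runLengthsAtLeast (t : Int) (acc : PySem.Set (List Char)) : List (List Char) → PySem.Set (List Char)
  | [] => acc
  | p :: rest =>
      runLengthsAtLeast t
        (if t ≤ ((rest.takeWhile (fun q => q == p)).length : Int) + 1 then PySem.Set.add acc p else acc)
        (rest.dropWhile (fun q => q == p))
  termination_by l => l.length
  decreasing_by exact Nat.lt_succ_of_le (List.length_dropWhile_le _ _)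

def chunkedClumpFinder_alt (sequence : String) (k : Int) (L : Int) (t : Int) : List String :=
  let s := sequence.toList
  let result : PySem.Set (List Char) :=
    (PySem.List.pyRange 0 (PySem.Str.len sequence) 1).foldl (fun result i =>
      let window := PySem.List.slice s (some i) (some (i + L))
      let pats := (PySem.List.pyRange 0 (window.length : Int) 1).map
        (fun j => PySem.List.slice window (some j) (some (j + k)))
      let qualifying := runLengthsAtLeast t PySem.Set.empty (PySem.List.sorted pats (fun p => p) false)
      PySem.Set.update result (pats.filter (fun p => qualifying.contains p))) PySem.Set.empty
  result.map String.ofList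

-- ===== PRECONDITION & SPEC =====
def Spec_chunkedClumpFinder (sequence : String) (k : Int) (L : Int) (t : Int) (out : List String) : Prop := out = chunkedClumpFinder_alt sequence k L t
instance (sequence : String) (k : Int) (L : Int) (t : Int) (out : List String) : Decidable (Spec_chunkedClumpFinder sequence k L t out) := by unfold Spec_chunkedClumpFinder; infer_instance

-- ===== CLAIM (what is proved, stated in full; the proofs are below) =====
def Claim_equal_chunkedClumpFinder : Prop := ∀ (sequence : String) (k : Int) (L : Int) (t : Int), Dom_chunkedClumpFinder sequence k L t → Spec_chunkedClumpFinder sequence k L t (chunkedClumpFinder sequence k L t)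

-- ===== LEMMAS AND PROOFS =====

-- proof-only abbreviations for the two per-window objects
def freqOf (window : List Char) (k : Int) : PySem.Dict (List Char) Int :=
  (PySem.List.pyRange 0 (window.length : Int) 1).foldl (fun frequencies j =>
    let pattern := PySem.List.slice window (some j) (some (j + k))
    if frequencies.contains pattern = false then
      frequencies.insert pattern 1
    else
      frequencies.modify pattern 0 (· + 1)) PySem.Dict.empty

def patsOf (window : List Char) (k : Int) : List (List Char) :=
  (PySem.List.pyRange 0 (window.length : Int) 1).map
    (fun j => PySem.List.slice window (some j) (some (j + k)))

-- A's counting step is Counter's step, on every dict and key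
lemma count_step_eq : ∀ (d : PySem.Dict (List Char) Int) (x : List Char),
    (if d.contains x = false then d.insert x 1 else d.modify x 0 (· + 1))
      = d.modify x 0 (· + 1) := by
  intro d x
  by_cases h : d.contains x = true
  · simp [h]
  · have h' : d.contains x = false := by simpa using h
    simp [h', PySem.Dict.modify, PySem.Dict.getD_of_not_contains _ _ h']

-- A's counting loop builds exactly collections.Counter of the pattern list
lemma freqOf_eq_counter (window : List Char) (k : Int) :
    freqOf window k = PySem.Dict.counter (patsOf window k) := by
  unfold freqOf patsOf
  rw [PySem.Dict.counter_eq_foldl, List.foldl_map]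
  exact PySem.List.foldl_congr_mem _ _ _ _ (fun d j _ => count_step_eq d _)

-- updating with one added element = adding it after the update
lemma update_add {α : Type} [BEq α] [LawfulBEq α] (s seen : PySem.Set α) (y : α) :
    PySem.Set.update s (PySem.Set.add seen y) = PySem.Set.add (PySem.Set.update s seen) y := by
  by_cases h : y ∈ seen
  · rw [PySem.Set.add_of_mem h, PySem.Set.add_of_mem (by rw [PySem.Set.mem_update]; exact Or.inr h)]
  · rw [PySem.Set.add_of_not_mem h, PySem.Set.update_eq_foldl, List.foldl_append,
        PySem.Set.update_eq_foldl]
    rfl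

-- updating with an already-deduplicated list = updating with the raw list
lemma update_update {α : Type} [BEq α] [LawfulBEq α] :
    ∀ (ys : List α) (seen s : PySem.Set α),
      PySem.Set.update s (PySem.Set.update seen ys) = PySem.Set.update (PySem.Set.update s seen) ys := by
  intro ys
  induction ys with
  | nil => intro seen s; rfl
  | cons y ys ih =>
      intro seen s
      have h1 : PySem.Set.update seen (y :: ys) = PySem.Set.update (PySem.Set.add seen y) ys := rfl
      have h2 : PySem.Set.update (PySem.Set.update s seen) (y :: ys)
          = PySem.Set.update (PySem.Set.add (PySem.Set.update s seen) y) ys := rfl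
      rw [h1, h2, ih, update_add]

-- filtering commutes with the first-occurrence set construction
lemma filter_foldl_add {α : Type} [BEq α] [LawfulBEq α] (P : α → Bool) :
    ∀ (xs : List α) (s : PySem.Set α),
      (List.foldl PySem.Set.add s xs).filter P
        = List.foldl PySem.Set.add (s.filter P) (xs.filter P) := by
  intro xs
  induction xs with
  | nil => intro s; rfl
  | cons x xs ih =>
      intro s
      by_cases hx : x ∈ s
      · have hadd : PySem.Set.add s x = s := PySem.Set.add_of_mem hx
        by_cases hP : P x = true
        · have hxf : x ∈ s.filter P := List.mem_filter.mpr ⟨hx, hP⟩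
          rw [List.foldl_cons, hadd, List.filter_cons_of_pos hP, List.foldl_cons,
            PySem.Set.add_of_mem hxf]
          exact ih s
        · rw [List.foldl_cons, hadd, List.filter_cons_of_neg hP]
          exact ih s
      · have hadd : PySem.Set.add s x = s ++ [x] := PySem.Set.add_of_not_mem hx
        by_cases hP : P x = true
        · have hxf : x ∉ s.filter P := fun hm => hx (List.mem_filter.mp hm).1
          have hfil : (s ++ [x]).filter P = PySem.Set.add (s.filter P) x := by
            rw [List.filter_append, PySem.Set.add_of_not_mem hxf]
            simp [hP]
          rw [List.foldl_cons, hadd, List.filter_cons_of_pos hP, List.foldl_cons,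
            ih (s ++ [x]), hfil]
        · have hfil : (s ++ [x]).filter P = s.filter P := by
            rw [List.filter_append]; simp [List.filter_cons_of_neg hP]
          rw [List.foldl_cons, hadd, List.filter_cons_of_neg hP, ih (s ++ [x]), hfil]

-- in a ≤-sorted list, everything after the run of the head is strictly greater
lemma lt_of_mem_dropWhile_sorted (x : List Char) (rest : List (List Char))
    (h : (x :: rest).Pairwise (fun a b => a ≤ b)) :
    ∀ y ∈ rest.dropWhile (fun q => q == x), x < y := by
  have hx : ∀ y ∈ rest, x ≤ y := (List.pairwise_cons.mp h).1
  have hp : rest.Pairwise (fun a b => a ≤ b) := (List.pairwise_cons.mp h).2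
  have hsub : (rest.dropWhile (fun q => q == x)).Sublist rest := List.dropWhile_sublist _
  have hp' : (rest.dropWhile (fun q => q == x)).Pairwise (fun a b => a ≤ b) := hp.sublist hsub
  cases hd : rest.dropWhile (fun q => q == x) with
  | nil => intro y hy; simp [hd] at *
  | cons h' t' =>
      have hne : (h' == x) = false := by
        have hnn : rest.dropWhile (fun q => q == x) ≠ [] := by rw [hd]; simp
        have := List.head_dropWhile_not (fun q => q == x) hnn
        simpa [hd] using this
      have hnex : h' ≠ x := by simpa using hne
      have hmem : h' ∈ rest := hsub.mem (by rw [hd]; exact List.mem_cons_self)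
      have hlt : x < h' := lt_of_le_of_ne (hx h' hmem) (Ne.symm hnex)
      intro y hy
      rcases List.mem_cons.mp hy with rfl | hy'
      · exact hlt
      · have hle : h' ≤ y := by
          rw [hd] at hp'
          exact (List.pairwise_cons.mp hp').1 y hy'
        exact lt_of_lt_of_le hlt hle

-- membership in B's run-scan result: exactly the elements whose count is ≥ t (on a sorted list)
lemma mem_runLengthsAtLeast (t : Int) :
    ∀ (l : List (List Char)), l.Pairwise (fun a b => a ≤ b) →
      ∀ (acc : PySem.Set (List Char)) (p : List Char),
        p ∈ runLengthsAtLeast t acc l ↔ p ∈ acc ∨ (p ∈ l ∧ t ≤ (l.count p : Int)) := by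
  intro l
  induction hn : l.length using Nat.strong_induction_on generalizing l with
  | _ n ih =>
    cases l with
    | nil => intro _ acc p; simp [runLengthsAtLeast]
    | cons x rest =>
        intro hsort acc p
        have hrun : ∀ y ∈ rest.takeWhile (fun q => q == x), y = x := by
          intro y hy
          have := List.mem_takeWhile_imp hy
          simpa using this
        have hdrop : ∀ y ∈ rest.dropWhile (fun q => q == x), x < y :=
          lt_of_mem_dropWhile_sorted x rest hsort
        have hxnd : x ∉ rest.dropWhile (fun q => q == x) := fun hm => lt_irrefl x (hdrop x hm)
        have hsplit : rest.takeWhile (fun q => q == x) ++ rest.dropWhile (fun q => q == x) = rest :=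
          List.takeWhile_append_dropWhile
        have hsort' : (rest.dropWhile (fun q => q == x)).Pairwise (fun a b => a ≤ b) :=
          ((List.pairwise_cons.mp hsort).2).sublist (List.dropWhile_sublist _)
        have hlen : (rest.dropWhile (fun q => q == x)).length < n := by
          have h1 := List.length_dropWhile_le (fun q => q == x) rest
          have h2 : rest.length + 1 = n := by simpa using hn
          omega
        have hIH := ih _ hlen (rest.dropWhile (fun q => q == x)) rfl hsort'
        have hcr : ∀ q : List Char, List.count q rest
            = List.count q (rest.takeWhile (fun r => r == x))
              + List.count q (rest.dropWhile (fun r => r == x)) := by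
          intro q
          conv_lhs => rw [← hsplit]
          rw [List.count_append]
        have hstep : runLengthsAtLeast t acc (x :: rest)
            = runLengthsAtLeast t
                (if t ≤ ((rest.takeWhile (fun q => q == x)).length : Int) + 1 then PySem.Set.add acc x else acc)
                (rest.dropWhile (fun q => q == x)) := by
          rw [runLengthsAtLeast]
        by_cases hpx : p = x
        · subst hpx
          have hcountx : List.count p (p :: rest) = (rest.takeWhile (fun q => q == p)).length + 1 := by
            have h1 : List.count p (rest.takeWhile (fun q => q == p))
                = (rest.takeWhile (fun q => q == p)).length :=
              List.count_eq_length.mpr (fun b hb => (hrun b hb).symm)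
            have h2 : List.count p (rest.dropWhile (fun q => q == p)) = 0 :=
              List.count_eq_zero.mpr hxnd
            have h3 := hcr p
            rw [List.count_cons_self]
            omega
          rw [hstep, hIH _ p]
          by_cases hq : t ≤ ((rest.takeWhile (fun q => q == p)).length : Int) + 1
          · rw [if_pos hq]
            constructor
            · intro _
              refine Or.inr ⟨List.mem_cons_self, ?_⟩
              rw [hcountx]; push_cast; omega
            · intro _
              exact Or.inl ((PySem.Set.mem_add acc p p).mpr (Or.inr rfl))
          · rw [if_neg hq]
            constructor
            · rintro (h | ⟨h1, _⟩)
              · exact Or.inl h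
              · exact absurd h1 hxnd
            · rintro (h | ⟨_, h2⟩)
              · exact Or.inl h
              · exfalso; rw [hcountx] at h2; push_cast at h2; omega
        · have hprun : p ∉ rest.takeWhile (fun q => q == x) := fun hm => hpx (hrun p hm)
          have hmemiff : p ∈ x :: rest ↔ p ∈ rest.dropWhile (fun q => q == x) := by
            constructor
            · intro h
              rcases List.mem_cons.mp h with h' | h'
              · exact absurd h' hpx
              · have hm2 : p ∈ rest.takeWhile (fun q => q == x)
                    ++ rest.dropWhile (fun q => q == x) := by rw [hsplit]; exact h'
                rcases List.mem_append.mp hm2 with h1 | h2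
                · exact absurd h1 hprun
                · exact h2
            · intro h
              exact List.mem_cons.mpr (Or.inr (hsplit ▸ List.mem_append.mpr (Or.inr h)))
          have hcount : List.count p (x :: rest)
              = List.count p (rest.dropWhile (fun q => q == x)) := by
            have h0 : List.count p (rest.takeWhile (fun q => q == x)) = 0 :=
              List.count_eq_zero.mpr hprun
            have h3 := hcr p
            have h4 : List.count p (x :: rest) = List.count p rest := by
              simp [Ne.symm hpx]
            omega
          rw [hstep, hIH _ p]
          have haccif : p ∈ (if t ≤ ((rest.takeWhile (fun q => q == x)).length : Int) + 1
              then PySem.Set.add acc x else acc) ↔ p ∈ acc := by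
            split_ifs
            · rw [PySem.Set.mem_add]
              exact ⟨fun h => h.resolve_right hpx, Or.inl⟩
            · exact Iff.rfl
          rw [haccif, hmemiff, hcount]

-- B's qualifying test agrees with A's count test on every pattern of the window
lemma contains_qualifying (pats : List (List Char)) (t : Int) (p : List Char) (hp : p ∈ pats) :
    (runLengthsAtLeast t PySem.Set.empty (PySem.List.sorted pats (fun q => q) false)).contains p
      = decide (t ≤ (pats.count p : Int)) := by
  have hpair : (PySem.List.sorted pats (fun q => q) false).Pairwise (fun a b => a ≤ b) := by
    have h := PySem.List.sorted_pairwise (κ := List Char) pats (fun q => q)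
    have e : PySem.List.sorted pats (fun q => q) false
        = @PySem.List.sorted (List Char) (List Char) List.instLinearOrder.toLT
            LinearOrder.toDecidableLT pats (fun q => q) false := by congr 1
    rw [e]; exact h
  have hperm : (PySem.List.sorted pats (fun q => q) false).Perm pats :=
    PySem.List.sorted_perm pats (fun q => q) false
  have hmem := mem_runLengthsAtLeast t _ hpair PySem.Set.empty p
  have hempty : p ∉ (PySem.Set.empty : PySem.Set (List Char)) := by simp [PySem.Set.empty]
  by_cases hq : t ≤ (pats.count p : Int)
  · have : p ∈ runLengthsAtLeast t PySem.Set.empty (PySem.List.sorted pats (fun q => q) false) := by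
      rw [hmem]
      exact Or.inr ⟨(PySem.List.mem_sorted pats (fun q => q) false p).mpr hp, by rw [hperm.count_eq]; exact hq⟩
    rw [(PySem.Set.contains_iff _ _).mpr this]
    simp [hq]
  · have : p ∉ runLengthsAtLeast t PySem.Set.empty (PySem.List.sorted pats (fun q => q) false) := by
      rw [hmem]
      rintro (h | ⟨_, h2⟩)
      · exact hempty h
      · rw [hperm.count_eq] at h2; exact hq h2
    have hc : (runLengthsAtLeast t PySem.Set.empty
        (PySem.List.sorted pats (fun q => q) false)).contains p = false := by
      by_contra hcc
      exact this ((PySem.Set.contains_iff _ _).mp (by simpa using hcc))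
    rw [hc]
    simp [hq]

-- A's whole per-window step equals B's per-window step, for any accumulator
lemma window_step_eq (window : List Char) (k t : Int) (acc : PySem.Set (List Char)) :
    (freqOf window k).keys.foldl (fun fp p =>
        if t ≤ (freqOf window k).getD p 0 then PySem.Set.add fp p else fp) acc
    = PySem.Set.update acc ((patsOf window k).filter
        (fun p => (runLengthsAtLeast t PySem.Set.empty
          (PySem.List.sorted (patsOf window k) (fun q => q) false)).contains p)) := by
  rw [freqOf_eq_counter, PySem.Dict.keys_counter]
  have hp : (fun (fp : PySem.Set (List Char)) p =>
      if t ≤ (PySem.Dict.counter (patsOf window k)).getD p 0 then PySem.Set.add fp p else fp)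
      = fun fp p => if t ≤ ((patsOf window k).count p : Int) then PySem.Set.add fp p else fp := by
    funext fp p
    rw [PySem.Dict.getD_counter]
  rw [hp, PySem.List.foldl_ite_eq_foldl_filter (fun p => t ≤ ((patsOf window k).count p : Int))
        PySem.Set.add _ acc]
  -- left side is now: update acc ((Set.ofList pats).filter P)
  have hfa : (PySem.Set.ofList (patsOf window k)).filter
        (fun p => decide (t ≤ ((patsOf window k).count p : Int)))
      = PySem.Set.ofList ((patsOf window k).filter
        (fun p => decide (t ≤ ((patsOf window k).count p : Int)))) := by
    rw [PySem.Set.ofList_eq_foldl, PySem.Set.ofList_eq_foldl,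
      filter_foldl_add (fun p => decide (t ≤ ((patsOf window k).count p : Int)))]
    rfl
  have hupd : ∀ (ys : List (List Char)),
      PySem.Set.update acc (PySem.Set.ofList ys) = PySem.Set.update acc ys := by
    intro ys
    have : (PySem.Set.ofList ys : PySem.Set (List Char))
        = PySem.Set.update (PySem.Set.empty) ys := by
      rw [PySem.Set.ofList_eq_foldl, PySem.Set.update_eq_foldl]; rfl
    rw [this, update_update]
    rfl
  have hfc : (patsOf window k).filter
        (fun p => (runLengthsAtLeast t PySem.Set.empty
          (PySem.List.sorted (patsOf window k) (fun q => q) false)).contains p)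
      = (patsOf window k).filter
        (fun p => decide (t ≤ ((patsOf window k).count p : Int))) :=
    List.filter_congr (fun p hp => contains_qualifying (patsOf window k) t p hp)
  rw [hfc]
  calc List.foldl PySem.Set.add acc
        ((PySem.Set.ofList (patsOf window k)).filter
          (fun p => decide (t ≤ ((patsOf window k).count p : Int))))
      = PySem.Set.update acc
        ((PySem.Set.ofList (patsOf window k)).filter
          (fun p => decide (t ≤ ((patsOf window k).count p : Int)))) := by
        rw [PySem.Set.update_eq_foldl]
    _ = PySem.Set.update acc ((patsOf window k).filter
          (fun p => decide (t ≤ ((patsOf window k).count p : Int)))) := by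
        rw [hfa, hupd]

-- ===== VERDICT (by name: the statement is the Claim_ definition above) =====
theorem chunkedClumpFinder_spec : Claim_equal_chunkedClumpFinder := by
  intro sequence k L t _
  unfold Spec_chunkedClumpFinder chunkedClumpFinder chunkedClumpFinder_alt
  have hstep : (fun (fp : PySem.Set (List Char)) (i : Int) =>
      (freqOf (PySem.List.slice sequence.toList (some i) (some (i + L))) k).keys.foldl
        (fun fp p => if t ≤ (freqOf (PySem.List.slice sequence.toList (some i) (some (i + L))) k).getD p 0
          then PySem.Set.add fp p else fp) fp)
      = fun fp i => PySem.Set.update fp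
          ((patsOf (PySem.List.slice sequence.toList (some i) (some (i + L))) k).filter
            (fun p => (runLengthsAtLeast t PySem.Set.empty
              (PySem.List.sorted (patsOf (PySem.List.slice sequence.toList (some i) (some (i + L))) k)
                (fun q => q) false)).contains p)) := by
    funext fp i
    exact window_step_eq _ k t fp
  show (List.foldl (fun fp (i : Int) =>
      (freqOf (PySem.List.slice sequence.toList (some i) (some (i + L))) k).keys.foldl
        (fun fp p => if t ≤ (freqOf (PySem.List.slice sequence.toList (some i) (some (i + L))) k).getD p 0
          then PySem.Set.add fp p else fp) fp)
      PySem.Set.empty (PySem.List.pyRange 0 (PySem.Str.len sequence) 1)).map String.ofList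
    = (List.foldl (fun fp (i : Int) => PySem.Set.update fp
        ((patsOf (PySem.List.slice sequence.toList (some i) (some (i + L))) k).filter
          (fun p => (runLengthsAtLeast t PySem.Set.empty
            (PySem.List.sorted (patsOf (PySem.List.slice sequence.toList (some i) (some (i + L))) k)
              (fun q => q) false)).contains p)))
        PySem.Set.empty (PySem.List.pyRange 0 (PySem.Str.len sequence) 1)).map String.ofList
  rw [hstep]
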